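-- pv_equiv track=rewrite | github.com/Gabifinks/annpakgen | src/extraction_strategy/gene_extraction_strategy.py | find_genome
-- ===== SOURCE A (Python) =====
-- from typing import List
--
-- def find_genome(genbank_lines: List[str]) -> List[str]:
--     """Extrai a sequência do genoma do bloco entre 'ORIGIN' e '//'."""
--     for i, line in enumerate(genbank_lines):
--         if line.strip().upper().startswith("ORIGIN"):
--             origin_index = i + 1
--             break
--     else:
--         return []
--
--     for i in range(origin_index, len(genbank_lines)):
--         if genbank_lines[i].strip().startswith("//"):
--             return genbank_lines[origin_index:i]
--
--     return []
-- ===== SOURCE B (Python) =====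
-- from typing import List
--
--
-- def find_genome(genbank_lines: List[str]) -> List[str]:
--     """Extrai a sequência do genoma do bloco entre 'ORIGIN' e '//'."""
--     in_block = False
--     genome = []
--     for line in genbank_lines:
--         if not in_block:
--             if line.strip().upper().startswith("ORIGIN"):
--                 in_block = True
--         elif line.strip().startswith("//"):
--             return genome
--         else:
--             genome.append(line)
--     return []
-- ===== Notes on version B (the rewrite author's own statement) =====
-- stated objective: simpler
-- what changed: Replaces the two index-based scans (enumerate to find ORIGIN, then range+slice to cut at //) by a single flag-driven pass that accumulates lines directly, with no indices or slicing.
import Mathlib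
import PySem

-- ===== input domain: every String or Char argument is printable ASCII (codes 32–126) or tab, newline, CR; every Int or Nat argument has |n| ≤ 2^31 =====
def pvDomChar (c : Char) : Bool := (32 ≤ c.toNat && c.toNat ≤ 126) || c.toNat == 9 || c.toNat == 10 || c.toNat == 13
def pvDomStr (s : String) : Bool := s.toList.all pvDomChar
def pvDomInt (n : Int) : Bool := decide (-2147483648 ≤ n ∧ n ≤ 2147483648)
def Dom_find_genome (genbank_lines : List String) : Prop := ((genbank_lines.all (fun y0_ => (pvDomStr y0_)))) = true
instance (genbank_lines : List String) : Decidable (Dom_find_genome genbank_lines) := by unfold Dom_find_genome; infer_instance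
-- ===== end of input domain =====

-- B replaces A's two index-based scans and slice by one flag-driven accumulating pass (objective: simpler).

-- ===== PORT A =====
-- first loop: 'for i, line in enumerate(genbank_lines)' carrying the index i; returns origin_index = i + 1
def fgA_findOrigin : Nat → List String → Option Nat
  | _, [] => none
  | i, line :: rest =>
    if PySem.Str.startswith (PySem.Str.upper (PySem.Str.strip line)) "ORIGIN" then some (i + 1)
    else fgA_findOrigin (i + 1) rest

-- second loop: 'for i in range(origin_index, len(genbank_lines))', returning the slice at the first '//' line
def fgA_scan (xs : List String) (o : Nat) : List Int → List String
  | [] => []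
  | i :: rest =>
    if PySem.Str.startswith (PySem.Str.strip (PySem.List.pyGetD xs i "")) "//" then
      PySem.List.slice xs (some (o : Int)) (some i)
    else fgA_scan xs o rest

def find_genome (genbank_lines : List String) : List String :=
  match fgA_findOrigin 0 genbank_lines with
  | none => []
  | some o => fgA_scan genbank_lines o (PySem.List.pyRange (o : Int) (PySem.List.len genbank_lines) 1)

-- ===== PORT B =====
-- one pass: in_block flag + accumulator 'genome'
def fgB_loop : List String → Bool → List String → List String
  | [], _, _ => []
  | line :: rest, false, genome =>
    if PySem.Str.startswith (PySem.Str.upper (PySem.Str.strip line)) "ORIGIN" then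
      fgB_loop rest true genome
    else fgB_loop rest false genome
  | line :: rest, true, genome =>
    if PySem.Str.startswith (PySem.Str.strip line) "//" then genome
    else fgB_loop rest true (genome ++ [line])

def find_genome_alt (genbank_lines : List String) : List String :=
  fgB_loop genbank_lines false []

-- ===== PRECONDITION & SPEC =====
def Spec_find_genome (genbank_lines : List String) (out : List String) : Prop := out = find_genome_alt genbank_lines
instance (genbank_lines : List String) (out : List String) : Decidable (Spec_find_genome genbank_lines out) := by unfold Spec_find_genome; infer_instance

-- ===== CLAIM (what is proved, stated in full; the proofs are below) =====
def Claim_equal_find_genome : Prop := ∀ (genbank_lines : List String), Dom_find_genome genbank_lines → Spec_find_genome genbank_lines (find_genome genbank_lines)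

-- ===== LEMMAS AND PROOFS =====

-- reference: the block after ORIGIN up to the first '//' line; none if no terminator
def fgRef : List String → Option (List String)
  | [] => none
  | line :: rest =>
    if PySem.Str.startswith (PySem.Str.strip line) "//" then some []
    else (fgRef rest).map (line :: ·)

theorem fgB_true_eq (ls : List String) : ∀ acc, fgB_loop ls true acc = (fgRef ls).elim [] (acc ++ ·) := by
  induction ls with
  | nil => intro acc; simp [fgB_loop, fgRef]
  | cons l rest ih =>
    intro acc
    by_cases h : PySem.Str.startswith (PySem.Str.strip l) "//" = true
    · simp only [fgB_loop, fgRef, h, if_true]; simp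
    · simp only [fgB_loop, fgRef, h, ih]
      cases fgRef rest <;> simp

theorem fgA_scan_eq (xs : List String) (o : Nat) :
    ∀ n j, j ≤ xs.length → j + n = xs.length → o ≤ j →
    fgA_scan xs o (PySem.List.pyRange (j : Int) (PySem.List.len xs) 1) =
      (fgRef (xs.drop j)).elim [] (fun r => (xs.drop o).take (j - o) ++ r) := by
  intro n
  induction n with
  | zero =>
    intro j hj hn _
    have hj' : j = xs.length := by omega
    rw [PySem.List.pyRange_one_eq_nil (by simp [PySem.List.len_eq, hj'])]
    simp [fgA_scan, hj', fgRef]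
  | succ n ih =>
    intro j hj hn ho
    have hjlt : j < xs.length := by omega
    rw [PySem.List.pyRange_one_cons (by simp [PySem.List.len_eq]; exact_mod_cast hjlt)]
    have hdrop : xs.drop j = xs[j] :: xs.drop (j + 1) := List.drop_eq_getElem_cons hjlt
    have hget : PySem.List.pyGetD xs (j : Int) "" = xs[j] := by
      rw [PySem.List.pyGetD_natCast]; exact List.getD_eq_getElem xs "" hjlt
    by_cases h : PySem.Str.startswith (PySem.Str.strip xs[j]) "//" = true
    · simp only [fgA_scan, hget, h, if_true, hdrop, fgRef]
      rw [PySem.List.slice_natCast]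
      simp
    · simp only [fgA_scan, hget, h]
      have : ((j : Int) + 1) = ((j + 1 : Nat) : Int) := by push_cast; ring
      rw [this, ih (j + 1) (by omega) (by omega) (by omega)]
      rw [hdrop]
      simp only [fgRef, if_neg h]
      cases hr : fgRef (xs.drop (j + 1)) with
      | none => simp
      | some r =>
        simp only [Option.map_some, Option.elim_some]
        have htake : (xs.drop o).take (j + 1 - o) = (xs.drop o).take (j - o) ++ [xs[j]] := by
          have hidx : (xs.drop o)[j - o]'(by simp; omega) = xs[j] := by
            rw [List.getElem_drop]; congr 1; omega
          rw [show j + 1 - o = (j - o) + 1 by omega, List.take_add_one,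
            List.getElem?_eq_getElem (by simp; omega), hidx]
          simp
        rw [htake]; simp

theorem fgA_eq_ref (xs : List String) :
    ∀ (full : List String) (k : Nat), full.drop k = xs →
    (match fgA_findOrigin k xs with
     | none => []
     | some o => fgA_scan full o (PySem.List.pyRange (o : Int) (PySem.List.len full) 1)) =
    fgB_loop xs false [] := by
  induction xs with
  | nil => intro full k _; simp [fgA_findOrigin, fgB_loop]
  | cons l rest ih =>
    intro full k hk
    have hklt : k < full.length := by
      by_contra h
      rw [List.drop_eq_nil_of_le (by omega)] at hk
      exact (List.cons_ne_nil l rest) hk.symm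
    have hrest : full.drop (k + 1) = rest := by
      have := List.drop_eq_getElem_cons hklt (l := full)
      rw [hk] at this
      exact (List.cons.injEq _ _ _ _ ▸ this).2.symm
    by_cases h : PySem.Str.startswith (PySem.Str.upper (PySem.Str.strip l)) "ORIGIN" = true
    · simp only [fgA_findOrigin, h, fgB_loop, if_true]
      rw [fgA_scan_eq full (k + 1) (full.length - (k + 1)) (k + 1) (by omega) (by omega) (le_refl _)]
      rw [hrest, fgB_true_eq]
      cases fgRef rest <;> simp
    · simp only [fgA_findOrigin, h, fgB_loop]
      exact ih full (k + 1) hrest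

-- ===== VERDICT (by name: the statement is the Claim_ definition above) =====
theorem find_genome_spec : Claim_equal_find_genome := by
  intro xs _
  unfold Spec_find_genome find_genome find_genome_alt
  have := fgA_eq_ref xs xs 0 (by simp)
  cases h : fgA_findOrigin 0 xs with
  | none => simpa [h] using this
  | some o => simpa [h] using this
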